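-- pv_equiv track=rewrite | github.com/Sreevardhan-reddy1/tc | app.py | _get_top10_slow
-- ===== SOURCE A (Python) =====
-- def _get_top10_slow(ritm_data, incident_data):
--     """Combine RITM and Incident top10_slow lists and return overall top-10 by duration."""
--     combined = []
--     for src in [ritm_data, incident_data]:
--         if not src:
--             continue
--         for rec in (src.get("top10_slow") or []):
--             combined.append(rec)
--     combined.sort(key=lambda x: x.get("duration_days", 0), reverse=True)
--     return combined[:10]
-- ===== SOURCE B (Python) =====
-- def _get_top10_slow(ritm_data, incident_data):
--     """Online selection: keep a duration-sorted list of at most 10 records, no full sort."""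
--     top = []
--     for src in (ritm_data, incident_data):
--         for rec in ((src or {}).get("top10_slow") or []):
--             d = rec.get("duration_days", 0)
--             i = 0
--             while i < len(top) and top[i].get("duration_days", 0) >= d:
--                 i += 1
--             top.insert(i, rec)
--             if len(top) > 10:
--                 top.pop()
--     return top
-- ===== Notes on version B (the rewrite author's own statement) =====
-- stated objective: alternative
-- what changed: Replaces build-all-then-sort-then-slice with an online bounded selection: each record is inserted into a duration-sorted list capped at 10 elements (evicting the smallest), so no full sort and no combined list are ever built.
import Mathlib
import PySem

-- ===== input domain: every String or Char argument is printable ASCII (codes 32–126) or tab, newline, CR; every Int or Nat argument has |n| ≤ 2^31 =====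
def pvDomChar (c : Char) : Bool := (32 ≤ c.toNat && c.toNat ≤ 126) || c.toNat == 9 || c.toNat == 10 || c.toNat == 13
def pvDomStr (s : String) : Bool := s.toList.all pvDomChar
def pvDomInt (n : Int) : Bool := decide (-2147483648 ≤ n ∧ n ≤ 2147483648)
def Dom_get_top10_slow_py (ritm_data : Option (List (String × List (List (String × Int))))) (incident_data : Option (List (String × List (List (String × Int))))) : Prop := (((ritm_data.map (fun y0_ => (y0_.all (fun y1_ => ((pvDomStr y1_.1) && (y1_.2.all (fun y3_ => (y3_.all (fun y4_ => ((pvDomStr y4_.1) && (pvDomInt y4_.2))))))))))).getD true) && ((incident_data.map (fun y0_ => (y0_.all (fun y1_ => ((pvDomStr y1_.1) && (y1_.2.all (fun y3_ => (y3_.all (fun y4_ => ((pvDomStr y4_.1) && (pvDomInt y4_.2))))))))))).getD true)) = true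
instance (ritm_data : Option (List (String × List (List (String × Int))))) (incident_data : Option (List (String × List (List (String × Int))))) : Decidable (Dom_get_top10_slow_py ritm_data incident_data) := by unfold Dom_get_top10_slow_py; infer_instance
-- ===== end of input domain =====

-- B replaces A's build-combined-then-sort-then-slice with an online bounded insertion keeping only the current top-10 (objective: alternative).

-- ===== PORT A =====
-- rec.get("duration_days", 0): assoc-list lookup, first match, default 0
def pvKey (rec : List (String × Int)) : Int :=
  match rec.find? (fun p => p.1 == "duration_days") with
  | some p => p.2
  | none => 0

-- src.get("top10_slow") or []: first match; a missing key and a falsy [] both yield []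
def pvRecs (d : List (String × List (List (String × Int)))) : List (List (String × Int)) :=
  match d.find? (fun p => p.1 == "top10_slow") with
  | some p => p.2
  | none => []

-- one iteration of A's outer 'for src in [ritm_data, incident_data]' loop
def pvStepA (acc : List (List (String × Int))) (src : Option (List (String × List (List (String × Int))))) : List (List (String × Int)) :=
  match src with
  | none => acc                                   -- 'if not src: continue' (None)
  | some d =>
    if d.isEmpty then acc                         -- 'if not src: continue' (empty dict)
    else (pvRecs d).foldl (fun c rec => c ++ [rec]) acc   -- 'combined.append(rec)'

def get_top10_slow_py (ritm_data : Option (List (String × List (List (String × Int))))) (incident_data : Option (List (String × List (List (String × Int))))) : List (List (String × Int)) :=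
  let combined := ([ritm_data, incident_data]).foldl pvStepA []
  PySem.List.slice (PySem.List.sorted combined pvKey true) none (some 10)

-- ===== PORT B =====
-- the while-loop scan + list.insert of Source B: insert rec before the first entry with smaller key
def pvInsertTop (rec : List (String × Int)) (top : List (List (String × Int))) : List (List (String × Int)) :=
  match top with
  | [] => [rec]
  | h :: t => if pvKey h ≥ pvKey rec then h :: pvInsertTop rec t else rec :: h :: t

-- one iteration of Source B's inner loop: insert, then 'if len(top) > 10: top.pop()'
def pvStepB (top : List (List (String × Int))) (rec : List (String × Int)) : List (List (String × Int)) :=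
  let t := pvInsertTop rec top
  if t.length > 10 then t.dropLast else t

def get_top10_slow_py_alt (ritm_data : Option (List (String × List (List (String × Int))))) (incident_data : Option (List (String × List (List (String × Int))))) : List (List (String × Int)) :=
  ([ritm_data, incident_data]).foldl (fun top src =>
    (pvRecs (src.getD [])).foldl pvStepB top) []    -- '(src or {}).get("top10_slow") or []'

-- ===== PRECONDITION & SPEC =====
def Spec_get_top10_slow_py (ritm_data : Option (List (String × List (List (String × Int))))) (incident_data : Option (List (String × List (List (String × Int))))) (out : List (List (String × Int))) : Prop := out = get_top10_slow_py_alt ritm_data incident_data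
instance (ritm_data : Option (List (String × List (List (String × Int))))) (incident_data : Option (List (String × List (List (String × Int))))) (out : List (List (String × Int))) : Decidable (Spec_get_top10_slow_py ritm_data incident_data out) := by unfold Spec_get_top10_slow_py; infer_instance

-- ===== CLAIM (what is proved, stated in full; the proofs are below) =====
def Claim_equal_get_top10_slow_py : Prop := ∀ (ritm_data : Option (List (String × List (List (String × Int))))) (incident_data : Option (List (String × List (List (String × Int))))), Dom_get_top10_slow_py ritm_data incident_data → Spec_get_top10_slow_py ritm_data incident_data (get_top10_slow_py ritm_data incident_data)

-- ===== LEMMAS AND PROOFS =====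

-- B's scan-and-insert is PySem's insertBy with the reverse-sort comparison
theorem pvInsertTop_eq_insertBy (rec : List (String × Int)) (top : List (List (String × Int))) :
    pvInsertTop rec top = PySem.List.insertBy (fun a b => decide (pvKey b < pvKey a)) rec top := by
  induction top with
  | nil => rfl
  | cons h t ih =>
    simp only [pvInsertTop, PySem.List.insertBy, ih]
    by_cases hk : pvKey h ≥ pvKey rec
    · simp [hk, not_lt.mpr hk]
    · simp [hk, lt_of_not_ge hk]

theorem length_insertBy' {α : Type} (bef : α → α → Bool) (x : α) (l : List α) :
    (PySem.List.insertBy bef x l).length = l.length + 1 := by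
  induction l with
  | nil => rfl
  | cons h t ih =>
    simp only [PySem.List.insertBy]
    split <;> simp [ih]

theorem take_cons_take {α : Type} (m : Nat) (h : α) (tl : List α) :
    (h :: tl.take m).take m = (h :: tl).take m := by
  cases m with
  | zero => simp
  | succ m' =>
    simp [List.take_succ_cons, List.take_take]

-- truncating-insert on the take-k prefix = take k of the full insert
theorem truncInsert_take {α : Type} (bef : α → α → Bool) (x : α) :
    ∀ (k : Nat) (l : List α),
      (if (PySem.List.insertBy bef x (l.take k)).length > k
       then (PySem.List.insertBy bef x (l.take k)).dropLast
       else PySem.List.insertBy bef x (l.take k))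
      = (PySem.List.insertBy bef x l).take k := by
  intro k l
  induction l generalizing k with
  | nil =>
    cases k with
    | zero => simp [PySem.List.insertBy]
    | succ m => simp [PySem.List.insertBy]
  | cons h tl ih =>
    cases k with
    | zero => simp [PySem.List.insertBy]
    | succ m =>
      rw [List.take_succ_cons]
      cases hb : bef x h with
      | true =>
        simp only [PySem.List.insertBy, hb, if_true]
        rw [List.take_succ_cons]
        by_cases hlen : m ≤ tl.length
        · have hmin : (tl.take m).length = m := by
            simp [List.length_take]; omega
          have hgt : (x :: h :: tl.take m).length > m + 1 := by
            simp [hmin]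
          rw [if_pos hgt, List.dropLast_eq_take]
          simp only [List.length_cons, hmin]
          rw [show m + 1 + 1 - 1 = m + 1 by omega]
          rw [List.take_succ_cons, take_cons_take]
        · have htk : tl.take m = tl := List.take_of_length_le (by omega)
          rw [htk]
          have hng : ¬ (x :: h :: tl).length > m + 1 := by
            simp only [List.length_cons]; omega
          rw [if_neg hng]
          rw [List.take_of_length_le (α := α) (by simp; omega)]
      | false =>
        simp only [PySem.List.insertBy, hb, Bool.false_eq_true, if_false]
        rw [List.take_succ_cons]
        have hs : PySem.List.insertBy bef x (tl.take m) ≠ [] := by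
          intro hc
          have := congrArg List.length hc
          simp [length_insertBy'] at this
        by_cases hgt : (PySem.List.insertBy bef x (tl.take m)).length > m
        · rw [if_pos (by simp only [List.length_cons]; omega),
              List.dropLast_cons_of_ne_nil hs, ← ih m, if_pos hgt]
        · rw [if_neg (by simp only [List.length_cons]; omega), ← ih m, if_neg hgt]

-- Source B's fold, started from a take-10 prefix, tracks take 10 of the insertBy fold
theorem foldB_eq_take_foldIns (xs : List (List (String × Int))) :
    ∀ acc : List (List (String × Int)),
      xs.foldl pvStepB (acc.take 10)
      = (xs.foldl (fun a x => PySem.List.insertBy (fun a b => decide (pvKey b < pvKey a)) x a) acc).take 10 := by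
  induction xs with
  | nil => intro acc; rfl
  | cons x xs ih =>
    intro acc
    simp only [List.foldl_cons]
    rw [show pvStepB (acc.take 10) x
          = (PySem.List.insertBy (fun a b => decide (pvKey b < pvKey a)) x acc).take 10 by
        simp only [pvStepB, pvInsertTop_eq_insertBy]
        exact truncInsert_take _ x 10 acc]
    exact ih _

-- appending one by one is plain append
theorem foldl_append_singleton {α : Type} (l acc : List α) :
    l.foldl (fun c r => c ++ [r]) acc = acc ++ l := by
  induction l generalizing acc with
  | nil => simp
  | cons h t ih => simp [ih]

-- A's per-source step appends B's per-source record list (the empty-dict guard is redundant: pvRecs [] = [])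
theorem pvStepA_eq (acc : List (List (String × Int))) (src : Option (List (String × List (List (String × Int))))) :
    pvStepA acc src = acc ++ pvRecs (src.getD []) := by
  cases src with
  | none => simp [pvStepA, pvRecs]
  | some d =>
    cases d with
    | nil => simp [pvStepA, pvRecs]
    | cons h t =>
      simp only [pvStepA, List.isEmpty_cons, Bool.false_eq_true, if_false, Option.getD_some]
      exact foldl_append_singleton _ _

-- ===== VERDICT (by name: the statement is the Claim_ definition above) =====
theorem get_top10_slow_py_spec : Claim_equal_get_top10_slow_py := by
  intro r i _
  unfold Spec_get_top10_slow_py get_top10_slow_py get_top10_slow_py_alt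
  simp only [List.foldl_cons, List.foldl_nil, pvStepA_eq, List.nil_append]
  rw [show (10 : Int) = ((10 : Nat) : Int) by norm_num, PySem.List.slice_to_natCast,
      PySem.List.sorted_rev_eq_foldl_insertBy, ← List.foldl_append]
  have h := foldB_eq_take_foldIns (pvRecs (r.getD []) ++ pvRecs (i.getD [])) []
  simp only [List.take_nil] at h
  rw [← h, List.foldl_append]
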